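-- pv_equiv track=rewrite | github.com/dengguojie/vue-element-admin | auto_schedule/python/tbe/dsl/compute/gemm_compute_util.py | _mapping_batch_a_or_b
-- ===== SOURCE A (Python) =====
-- from functools import reduce as functools_reduce
--
-- def _mapping_batch_a_or_b(batch_reduce, batch_max, batch_ori):
--     """
--     map batch_reduce into batch_a or batch_b
--     e.g. A x B = C
--         A = [B1,1,1,B4, K//16,M//16,16,16]
--         B = [B2,B3,1, N//16,K//16,16,16]
--         C = [B1,B2,B3,B4, N//16,M//16,16,16]
--
--         batch_reduce is in range of 0 to B1*B2*B3*B4-1,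
--         b1 = batch_reduce // (B2*B3*B4),
--         b2 = batch_reduce // (B3*B4) % B2,
--         b3 = batch_reduce // B4 % B3,
--         b4 = batch_reduce % B4
--
--         batch_a = B4*b1 + b4,
--         batch_b = B3*b2 + b3
--
--     Parameters:
--         batch_reduce: reduce shape of batch_max, number
--         batch_max: broadcast batch, list
--         batch_ori: original batch_a or batch_b, list
--
--     Returns:
--         batch_mapping: the right batch in batch_a or batch_b
--             corresponding to batch_reduce
--     """
--     batch_mapping = 0
--     for i in range(len(batch_ori)):
--         if batch_ori[i] != 1:
--             if i == len(batch_ori) - 1: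
--                 batch_tmp = batch_reduce % batch_max[i]
--             elif i == 0:
--                 batch_tmp = batch_reduce // functools_reduce(lambda x, y: x * y, batch_max[i+1:])
--             else:
--                 batch_tmp = batch_reduce // functools_reduce(lambda x, y: x * y, batch_max[i+1:]) % batch_max[i]
--             if i == len(batch_ori) - 1:
--                 batch_mapping += batch_tmp
--             else:
--                 batch_mapping += batch_tmp * functools_reduce(lambda x, y: x * y, batch_ori[i+1:])
--     return batch_mapping
-- ===== SOURCE B (Python) =====
-- def _mapping_batch_a_or_b(batch_reduce, batch_max, batch_ori):
--     n = len(batch_ori)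
--     # one reverse pass: suffix products of batch_max and batch_ori (entry n = 1)
--     suf_max = [1] * (n + 1)
--     suf_ori = [1] * (n + 1)
--     for i in range(n - 1, -1, -1):
--         suf_max[i] = batch_max[i] * suf_max[i + 1]
--         suf_ori[i] = batch_ori[i] * suf_ori[i + 1]
--     total = 0
--     for i in range(n):
--         if batch_ori[i] != 1:
--             q = batch_reduce // suf_max[i + 1]
--             d = q if i == 0 and n > 1 else q % batch_max[i]
--             total += d * suf_ori[i + 1]
--     return total
-- ===== Notes on version B (the rewrite author's own statement) =====
-- stated objective: simpler
-- what changed: B precomputes suffix products of batch_max and batch_ori in one reverse pass and then does a single uniform loop (quotient by the precomputed suffix, optional modulo, multiply by the precomputed ori-suffix), replacing A's three-way branch with repeated functools.reduce scans over slices.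
-- outside the precondition, e.g. on _mapping_batch_a_or_b(0, [5], [1, 1]): A returns 0, B raises IndexError; on _mapping_batch_a_or_b(40, [3, 4, 5], [2, 2]): A returns 4, B returns 20
import Mathlib
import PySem

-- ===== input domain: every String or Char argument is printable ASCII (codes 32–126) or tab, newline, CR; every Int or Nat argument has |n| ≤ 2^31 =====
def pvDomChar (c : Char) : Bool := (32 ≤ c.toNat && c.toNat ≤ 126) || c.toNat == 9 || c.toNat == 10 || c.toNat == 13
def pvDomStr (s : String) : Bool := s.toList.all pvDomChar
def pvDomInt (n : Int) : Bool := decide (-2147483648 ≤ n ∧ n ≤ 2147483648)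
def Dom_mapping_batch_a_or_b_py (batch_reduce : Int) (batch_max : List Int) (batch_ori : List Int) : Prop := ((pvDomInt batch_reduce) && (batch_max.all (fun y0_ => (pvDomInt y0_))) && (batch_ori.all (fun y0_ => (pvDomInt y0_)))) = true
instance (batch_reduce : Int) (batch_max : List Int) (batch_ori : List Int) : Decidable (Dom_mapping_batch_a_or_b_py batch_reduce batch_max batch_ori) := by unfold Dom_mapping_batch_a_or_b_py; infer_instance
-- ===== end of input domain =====

-- B replaces A's per-index functools.reduce scans over slices by two suffix-product
-- tables built in one reverse pass, then a single uniform loop (simpler decomposition).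


-- ===== PORT A =====
-- functools.reduce(lambda x, y: x * y, l): on [] Python raises TypeError (Pre_ keeps
-- every reached slice nonempty); on h :: t it folds multiplication from h.
def pyReduceMul : List Int → Int
  | [] => 0
  | h :: t => t.foldl (· * ·) h

-- Literal port of A. i runs over range(len(batch_ori)), so batch_ori[i] is in range
-- (getD is exact there); batch_max[i] is in range under Pre_ (equal lengths);
-- batch_max[i+1:] / batch_ori[i+1:] with 0 ≤ i+1 is List.drop (i+1) (slice from a
-- nonnegative index, exact).
def mapping_batch_a_or_b_py (batch_reduce : Int) (batch_max : List Int) (batch_ori : List Int) : Int :=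
  (List.range batch_ori.length).foldl (fun batch_mapping i =>
    if batch_ori.getD i 0 ≠ 1 then
      let batch_tmp : Int :=
        if i = batch_ori.length - 1 then
          PySem.Int.mod batch_reduce (batch_max.getD i 0)
        else if i = 0 then
          PySem.Int.floordiv batch_reduce (pyReduceMul (batch_max.drop (i+1)))
        else
          PySem.Int.mod (PySem.Int.floordiv batch_reduce (pyReduceMul (batch_max.drop (i+1))))
            (batch_max.getD i 0)
      if i = batch_ori.length - 1 then batch_mapping + batch_tmp
      else batch_mapping + batch_tmp * pyReduceMul (batch_ori.drop (i+1))
    else batch_mapping) 0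

-- ===== PORT B =====
-- B's reverse pass: suffixProds l has entry k = product of l[k:], last entry 1.
def suffixProds : List Int → List Int
  | [] => [1]
  | x :: xs => let s := suffixProds xs; (x * s.headD 1) :: s

-- Literal port of B (Source B): two suffix tables built in one reverse pass, then one
-- uniform loop.  B's reverse pass reads batch_max[i] for i < len(batch_ori), i.e. the
-- first n entries (List.take n; Python B raises IndexError on a shorter batch_max,
-- which Pre_ excludes).
def mapping_batch_a_or_b_py_alt (batch_reduce : Int) (batch_max : List Int) (batch_ori : List Int) : Int :=
  let n := batch_ori.length
  let sufMax := suffixProds (batch_max.take n)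
  let sufOri := suffixProds batch_ori
  (List.range n).foldl (fun total i =>
    if batch_ori.getD i 0 ≠ 1 then
      let q := PySem.Int.floordiv batch_reduce (sufMax.getD (i+1) 1)
      let d := if i = 0 ∧ 1 < n then q else PySem.Int.mod q (batch_max.getD i 0)
      total + d * sufOri.getD (i+1) 1
    else total) 0

-- ===== PRECONDITION & SPEC =====
-- Pre_ excludes inputs where batch_max's length differs from batch_ori's (outside the
-- function's natural domain: A then reads slices of the longer batch_max or returns 0
-- only because every batch_ori entry is 1, while B's suffix pass needs one batch_max
-- entry per index) and inputs where a division or modulo A performs has divisor 0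
-- (A raises ZeroDivisionError there).
def Pre_mapping_batch_a_or_b_py (batch_reduce : Int) (batch_max : List Int) (batch_ori : List Int) : Prop :=
  batch_max.length = batch_ori.length ∧
  ∀ i : Nat, i < batch_ori.length → batch_ori.getD i 0 ≠ 1 →
    if i = batch_ori.length - 1 then batch_max.getD i 0 ≠ 0
    else (batch_max.drop (i+1)).prod ≠ 0 ∧ (i ≠ 0 → batch_max.getD i 0 ≠ 0)

instance (batch_reduce : Int) (batch_max : List Int) (batch_ori : List Int) : Decidable (Pre_mapping_batch_a_or_b_py batch_reduce batch_max batch_ori) := by unfold Pre_mapping_batch_a_or_b_py; infer_instance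

def pvWitness_mapping_batch_a_or_b_py : Int × List Int × List Int := (5, [2, 3], [2, 3])

def Spec_mapping_batch_a_or_b_py (batch_reduce : Int) (batch_max : List Int) (batch_ori : List Int) (out : Int) : Prop := out = mapping_batch_a_or_b_py_alt batch_reduce batch_max batch_ori
instance (batch_reduce : Int) (batch_max : List Int) (batch_ori : List Int) (out : Int) : Decidable (Spec_mapping_batch_a_or_b_py batch_reduce batch_max batch_ori out) := by unfold Spec_mapping_batch_a_or_b_py; infer_instance

-- ===== CLAIM (what is proved, stated in full; the proofs are below) =====
def Claim_equal_mapping_batch_a_or_b_py : Prop := ∀ (batch_reduce : Int) (batch_max : List Int) (batch_ori : List Int), Dom_mapping_batch_a_or_b_py batch_reduce batch_max batch_ori → Pre_mapping_batch_a_or_b_py batch_reduce batch_max batch_ori → Spec_mapping_batch_a_or_b_py batch_reduce batch_max batch_ori (mapping_batch_a_or_b_py batch_reduce batch_max batch_ori)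

-- ===== LEMMAS AND PROOFS =====

theorem foldl_mul_eq (t : List Int) (a : Int) : t.foldl (· * ·) a = a * t.prod := by
  induction t generalizing a with
  | nil => simp
  | cons x t ih => simp [List.foldl_cons, ih (a * x), List.prod_cons, mul_assoc]

theorem pyReduceMul_eq_prod (l : List Int) (h : l ≠ []) : pyReduceMul l = l.prod := by
  cases l with
  | nil => exact absurd rfl h
  | cons x t => simp [pyReduceMul, foldl_mul_eq, List.prod_cons]

theorem suffixProds_getD (l : List Int) (k : Nat) :
    (suffixProds l).getD k 1 = (l.drop k).prod := by
  induction l generalizing k with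
  | nil => cases k <;> simp [suffixProds]
  | cons x xs ih =>
    cases k with
    | zero =>
      have h0 := ih 0
      cases hs : suffixProds xs with
      | nil => simp [hs] at h0; simp [suffixProds, hs, List.prod_cons, ← h0]
      | cons a s =>
        simp [hs] at h0
        simp [suffixProds, hs, List.prod_cons, h0]
    | succ k =>
      simp only [suffixProds]
      simpa [List.getD] using ih k

theorem floordiv_one (x : Int) : PySem.Int.floordiv x 1 = x := by
  rw [PySem.Int.floordiv_eq_ediv_of_pos (by norm_num : (0:Int) < 1)]; exact Int.ediv_one x

theorem mapping_batch_a_or_b_py_spec : Claim_equal_mapping_batch_a_or_b_py := by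
  intro br bm bo _ ⟨hlen, _⟩
  have htake : bm.take bo.length = bm := by rw [← hlen]; exact List.take_length
  unfold Spec_mapping_batch_a_or_b_py mapping_batch_a_or_b_py mapping_batch_a_or_b_py_alt
  apply PySem.List.foldl_congr_mem
  intro acc i hi
  rw [List.mem_range] at hi
  rw [htake]
  by_cases hone : bo.getD i 0 = 1
  · simp only [List.getD] at hone
    simp [List.getD, hone]
  · simp only [if_pos (by exact hone : bo.getD i 0 ≠ 1)]
    by_cases hlast : i = bo.length - 1
    · -- last index: suffix products past i are empty (lengths equal), multiplier 1
      have hbm : bm.drop (i + 1) = [] := List.drop_eq_nil_of_le (by omega)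
      have hbo : bo.drop (i + 1) = [] := List.drop_eq_nil_of_le (by omega)
      have hnot : ¬ (i = 0 ∧ 1 < bo.length) := by omega
      simp only [if_pos hlast, if_neg hnot, suffixProds_getD, hbm, hbo, List.prod_nil,
        floordiv_one, mul_one]
    · -- i < n - 1: the dropped slices are nonempty, reduce = prod
      have hbm : bm.drop (i + 1) ≠ [] := by
        simp only [ne_eq, List.drop_eq_nil_iff]; omega
      have hbo : bo.drop (i + 1) ≠ [] := by
        simp only [ne_eq, List.drop_eq_nil_iff]; omega
      rw [if_neg hlast, if_neg hlast, suffixProds_getD, suffixProds_getD,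
        ← pyReduceMul_eq_prod _ hbm, ← pyReduceMul_eq_prod _ hbo]
      by_cases h0 : i = 0
      · have : i = 0 ∧ 1 < bo.length := ⟨h0, by omega⟩
        rw [if_pos h0, if_pos this]
      · have : ¬ (i = 0 ∧ 1 < bo.length) := by simp [h0]
        rw [if_neg h0, if_neg this]
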